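-- pv_equiv track=rewrite | github.com/LazareLive/AutomatedDices | Automated Dice/Dice_Script.py | diceNumberAlgorithmSequence
-- ===== SOURCE A (Python) =====
-- import math
--
-- def isEven(n):
--     return ((n % 2) == 0)
--
-- def recursiveDiceNumberSequence(order):
--     #There are several "notable" sequences that we will use for the dice number sequence. They are called triad,
--     #tetrad and pentad. As order cannot be less than 3, we will only use these sequences to generate any dice.
--     #The goal will be to divide the number of faces until we can find a sequence. These sequences are generated by
--     #using various calculations on the classic dices.
--     #Tetrad case - Taken on the D3 and D6 dequences
--     if(order == 3):
--         return [3, 1, 2]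
--     #Tetrad case - Taken on the D8 sequence
--     elif(order == 4):
--         return [4, 1, 3, 2]
--     #Pentad case - Taken on the D10 sequence -- to be checked. This does not feel right
--     elif(order == 5):
--         return [5, 1, 4, 2, 3]
--     #For any other cases : use recursion until we find a n-ad sequence
--     newOrder = math.trunc(order / 2)
--     recursiveSequence = recursiveDiceNumberSequence(newOrder)
--     #As the recursiveSequence will send half of the information, creation of a new array
--     numberSequence = [0] * order
--     if(isEven(order)):
--         #On the case of an even order dice, check witch method to use based on the last recursion sequence
--         for i in range(newOrder):
--                 #Generate the even-numbers on one polar side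
--                 numberSequence[i] = recursiveSequence[i] * 2
--                 #Generate the odd_numbers on the other side
--                 if(isEven(newOrder)):
--                     #On the even-even case, the last sequence is repeated to generate the current order
--                     numberSequence[newOrder + i] = numberSequence[i] - 1
--                 else:
--                     #On the even-odd case, the last sequence must be inverted to have a weak-strong alternance
--                     numberSequence[newOrder + i] = ((newOrder - recursiveSequence[i] + 1) * 2) - 1
--     else:
--         #On the case of an odd dice order, generate the dice following these rules
--         #Placement of the first number
--         numberSequence[0] = order
--         #Placement of the recursive sequence
--         for i in range(newOrder):
--             #Generation of the even numbers on a polar side of the order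
--             numberSequence[i + 1] = recursiveSequence[newOrder - i - 1] * 2
--             #Generation of the odd numbers
--             numberSequence[order - (i + 1)] = order - numberSequence[i + 1]
--     #Return the number sequence at the end
--     return numberSequence
--
-- def diceNumberAlgorithmSequence(faces):
--     #First: check the number of asked faces. Cannot be less than 3.
--     if(faces < 3):
--         return [(i + 1) for i in range(faces)]
--     #If the number of faces is 4, a specific array must be returned as this cannot be created by the algorithm, and this is
--     #the only solution for a 4 sided die
--     if(faces == 4):
--         return [4, 2, 1, 3]
--     #In all other cases, we need to check whereas the die is even or odd
--     if(isEven(faces)):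
--         #If it is even, the generation will follow the standard dice number sequence generation as the opposite sides must be
--         #equal to the number of the die faces plus one.
--         #Calculation of the even number sequence
--         evenFaces = math.trunc(faces / 2)
--         numberSequenceOrder = recursiveDiceNumberSequence(evenFaces)
--         for i in range(evenFaces):
--             #For each even number generated (NSO multiplied by 2)
--             numberSequenceOrder[i] = numberSequenceOrder[i] * 2
--             #Creation of the opposite side of the die
--             numberSequenceOrder.append(faces - numberSequenceOrder[i] + 1)
--         return numberSequenceOrder
--     else:
--         #If it is odd, the generation is automatically created by the recursion
--         return recursiveDiceNumberSequence(faces)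
--     #In case of a problem, always send zero
--     return [0]
-- ===== SOURCE B (Python) =====
-- def diceNumberAlgorithmSequence(faces):
--     # Iterative bottom-up reconstruction: collect the halving chain of orders,
--     # then rebuild each level with list comprehensions instead of recursing and
--     # writing into a preallocated array.
--     if faces < 3:
--         return list(range(1, faces + 1))
--     if faces == 4:
--         return [4, 2, 1, 3]
--     start = faces // 2 if faces % 2 == 0 else faces
--     chain = []
--     o = start
--     while o not in (3, 4, 5):
--         chain.append(o)
--         o //= 2
--     seq = {3: [3, 1, 2], 4: [4, 1, 3, 2], 5: [5, 1, 4, 2, 3]}[o]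
--     for order in reversed(chain):
--         half = order // 2
--         if order % 2 == 0:
--             if half % 2 == 0:
--                 seq = [x * 2 for x in seq] + [x * 2 - 1 for x in seq]
--             else:
--                 seq = [x * 2 for x in seq] + [(half - x + 1) * 2 - 1 for x in seq]
--         else:
--             evens = [seq[half - 1 - i] * 2 for i in range(half)]
--             seq = [order] + evens + [order - e for e in reversed(evens)]
--     if faces % 2 == 0:
--         doubled = [x * 2 for x in seq]
--         return doubled + [faces - x + 1 for x in doubled]
--     return seq
-- ===== Notes on version B (the rewrite author's own statement) =====
-- stated objective: alternative
-- what changed: Replaces the recursion that preallocates a zero array and writes both polar sides by index with an explicit halving chain of orders plus an iterative bottom-up rebuild of each level using list comprehensions/concatenation.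
import Mathlib
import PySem

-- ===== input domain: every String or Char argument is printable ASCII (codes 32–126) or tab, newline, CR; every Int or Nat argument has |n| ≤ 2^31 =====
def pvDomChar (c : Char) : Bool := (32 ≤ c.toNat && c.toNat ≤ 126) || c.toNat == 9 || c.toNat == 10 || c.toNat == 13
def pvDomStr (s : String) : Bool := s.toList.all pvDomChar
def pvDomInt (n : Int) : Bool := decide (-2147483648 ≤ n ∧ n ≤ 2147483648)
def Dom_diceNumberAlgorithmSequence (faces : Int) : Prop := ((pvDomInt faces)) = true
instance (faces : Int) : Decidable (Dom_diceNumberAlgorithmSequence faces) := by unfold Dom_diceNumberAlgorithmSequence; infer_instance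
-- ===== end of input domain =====

-- B replaces A's recursion-with-indexed-assignment by an explicit halving chain plus
-- iterative bottom-up rebuilding with list comprehensions (objective: alternative).


-- ===== PORT A =====
def pyIsEven (n : Int) : Bool := PySem.Int.mod n 2 == 0

-- recursiveDiceNumberSequence, with a fuel guard for totality only (every call made by
-- diceNumberAlgorithmSequence has order ≥ 3, where the recursion terminates and fuel suffices).
-- All Python list reads are in range on those calls, so `getD _ 0` is exact there.
-- math.trunc(order / 2) = floordiv for the positive orders of every call.
def recSeqA : Nat → Int → List Int
  | 0, _ => []
  | fuel + 1, order =>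
    if order = 3 then [3, 1, 2]
    else if order = 4 then [4, 1, 3, 2]
    else if order = 5 then [5, 1, 4, 2, 3]
    else
      let newOrder : Int := PySem.Int.floordiv order 2
      let recSeq := recSeqA fuel newOrder
      let n : Nat := newOrder.toNat
      let ns0 : List Int := List.replicate order.toNat 0
      if pyIsEven order then
        (List.range n).foldl (fun ns i =>
          let ns1 := ns.set i (recSeq.getD i 0 * 2)
          if pyIsEven newOrder then
            ns1.set (n + i) (ns1.getD i 0 - 1)
          else
            ns1.set (n + i) ((newOrder - recSeq.getD i 0 + 1) * 2 - 1)) ns0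
      else
        (List.range n).foldl (fun ns i =>
          let ns1 := ns.set (i + 1) (recSeq.getD (n - i - 1) 0 * 2)
          ns1.set (order.toNat - (i + 1)) (order - ns1.getD (i + 1) 0)) (ns0.set 0 order)

def diceNumberAlgorithmSequence (faces : Int) : List Int :=
  if faces < 3 then (PySem.List.pyRange 0 faces 1).map (fun i => i + 1)
  else if faces = 4 then [4, 2, 1, 3]
  else if pyIsEven faces then
    let evenFaces := PySem.Int.floordiv faces 2
    let nso := recSeqA faces.toNat evenFaces
    (List.range evenFaces.toNat).foldl (fun ns i =>
      let ns1 := ns.set i (ns.getD i 0 * 2)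
      ns1 ++ [faces - ns1.getD i 0 + 1]) nso
  else recSeqA faces.toNat faces

-- ===== PORT B =====
def baseSeqB (o : Int) : List Int :=
  if o = 4 then [4, 1, 3, 2] else if o = 5 then [5, 1, 4, 2, 3] else [3, 1, 2]

-- the while loop collecting the halving chain (fuel guard for totality only)
def chainB : Nat → Int → List Int × Int
  | 0, o => ([], o)
  | fuel + 1, o =>
    if o = 3 ∨ o = 4 ∨ o = 5 then ([], o)
    else
      let p := chainB fuel (PySem.Int.floordiv o 2)
      (o :: p.1, p.2)

def stepB (order : Int) (seq : List Int) : List Int :=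
  let half := PySem.Int.floordiv order 2
  if PySem.Int.mod order 2 == 0 then
    if PySem.Int.mod half 2 == 0 then
      seq.map (fun x => x * 2) ++ seq.map (fun x => x * 2 - 1)
    else
      seq.map (fun x => x * 2) ++ seq.map (fun x => (half - x + 1) * 2 - 1)
  else
    let evens := (List.range half.toNat).map (fun i => seq.getD (half.toNat - 1 - i) 0 * 2)
    order :: (evens ++ evens.reverse.map (fun e => order - e))

def diceNumberAlgorithmSequence_alt (faces : Int) : List Int :=
  if faces < 3 then PySem.List.pyRange 1 (faces + 1) 1
  else if faces = 4 then [4, 2, 1, 3]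
  else
    let start := if PySem.Int.mod faces 2 == 0 then PySem.Int.floordiv faces 2 else faces
    let p := chainB faces.toNat start
    let seq := p.1.foldr stepB (baseSeqB p.2)
    if PySem.Int.mod faces 2 == 0 then
      let doubled := seq.map (fun x => x * 2)
      doubled ++ doubled.map (fun x => faces - x + 1)
    else seq

-- ===== PRECONDITION & SPEC =====
def Spec_diceNumberAlgorithmSequence (faces : Int) (out : List Int) : Prop := out = diceNumberAlgorithmSequence_alt faces
instance (faces : Int) (out : List Int) : Decidable (Spec_diceNumberAlgorithmSequence faces out) := by unfold Spec_diceNumberAlgorithmSequence; infer_instance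

-- ===== CLAIM (what is proved, stated in full; the proofs are below) =====
def Claim_equal_diceNumberAlgorithmSequence : Prop := ∀ (faces : Int), Dom_diceNumberAlgorithmSequence faces → Spec_diceNumberAlgorithmSequence faces (diceNumberAlgorithmSequence faces)

-- ===== LEMMAS AND PROOFS =====

lemma foldlEven (n : Nat) (a : Nat → Int) (g : Nat → Int → Int) :
    ∀ (m k : Nat), m + k = n →
      (List.range' k m).foldl
        (fun ns i => (ns.set i (a i)).set (n + i) (g i ((ns.set i (a i)).getD i 0)))
        ((List.range k).map a ++ List.replicate m 0 ++
          (List.range k).map (fun i => g i (a i)) ++ List.replicate m 0)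
      = (List.range n).map a ++ (List.range n).map (fun i => g i (a i)) := by
  intro m
  induction m with
  | zero =>
    intro k hk
    have : k = n := by omega
    subst this
    simp
  | succ m ih =>
    intro k hk
    rw [List.range'_succ, List.foldl_cons]
    show List.foldl _
      (((((List.range k).map a ++ List.replicate (m+1) 0 ++
          (List.range k).map (fun i => g i (a i)) ++ List.replicate (m+1) 0).set k (a k)).set (n + k)
        (g k ((((List.range k).map a ++ List.replicate (m+1) 0 ++
          (List.range k).map (fun i => g i (a i)) ++ List.replicate (m+1) 0).set k (a k)).getD k 0))))
      (List.range' (k+1) m) = _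
    have h1 : ((List.range k).map a ++ List.replicate (m+1) 0 ++
          (List.range k).map (fun i => g i (a i)) ++ List.replicate (m+1) 0).set k (a k)
        = (List.range k).map a ++ (a k :: List.replicate m 0) ++
          (List.range k).map (fun i => g i (a i)) ++ List.replicate (m+1) 0 := by
      rw [List.set_append_left _ _ (by simp), List.set_append_left _ _ (by simp),
          List.set_append_right _ _ (by simp)]
      simp [List.replicate_succ]
    rw [h1]
    have h2 : ((List.range k).map a ++ (a k :: List.replicate m 0) ++
          (List.range k).map (fun i => g i (a i)) ++ List.replicate (m+1) 0).getD k 0 = a k := by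
      simp [List.getD_eq_getElem?_getD]
    rw [h2]
    have h3 : ((List.range k).map a ++ (a k :: List.replicate m 0) ++
          (List.range k).map (fun i => g i (a i)) ++ List.replicate (m+1) 0).set (n + k) (g k (a k))
        = (List.range (k+1)).map a ++ List.replicate m 0 ++
          (List.range (k+1)).map (fun i => g i (a i)) ++ List.replicate m 0 := by
      rw [List.set_append_right _ _ (by simp; omega)]
      have hl : n + k - (((List.range k).map a ++ (a k :: List.replicate m 0) ++
          (List.range k).map (fun i => g i (a i))).length) = 0 := by simp; omega
      rw [hl]
      simp [List.replicate_succ, List.range_succ]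
    rw [h3]
    exact ih (k+1) (by omega)

lemma foldlOdd (n : Nat) (order : Int) (a : Nat → Int) :
    ∀ (m k : Nat), m + k = n →
      (List.range' k m).foldl
        (fun ns i => (ns.set (i + 1) (a i)).set (2 * n - i)
          (order - ((ns.set (i + 1) (a i)).getD (i + 1) 0)))
        (order :: ((List.range k).map a ++ List.replicate (2 * m) 0 ++
          ((List.range k).map (fun i => order - a i)).reverse))
      = order :: ((List.range n).map a ++ ((List.range n).map (fun i => order - a i)).reverse) := by
  intro m
  induction m with
  | zero =>
    intro k hk
    have : k = n := by omega
    subst this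
    simp
  | succ m ih =>
    intro k hk
    rw [List.range'_succ, List.foldl_cons]
    show List.foldl _
      ((((order :: ((List.range k).map a ++ List.replicate (2*(m+1)) 0 ++
          ((List.range k).map (fun i => order - a i)).reverse)).set (k+1) (a k)).set (2*n - k)
        (order - ((order :: ((List.range k).map a ++ List.replicate (2*(m+1)) 0 ++
          ((List.range k).map (fun i => order - a i)).reverse)).set (k+1) (a k)).getD (k+1) 0)))
      (List.range' (k+1) m) = _
    have hrep : List.replicate (2*(m+1)) (0:Int) = 0 :: List.replicate (2*m+1) 0 := by
      rw [show 2*(m+1) = (2*m+1)+1 by omega, List.replicate_succ]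
    have h1 : (order :: ((List.range k).map a ++ List.replicate (2*(m+1)) 0 ++
          ((List.range k).map (fun i => order - a i)).reverse)).set (k+1) (a k)
        = order :: ((List.range k).map a ++ (a k :: List.replicate (2*m+1) 0) ++
          ((List.range k).map (fun i => order - a i)).reverse) := by
      rw [hrep, List.set_cons_succ,
          List.set_append_left _ _ (by simp), List.set_append_right _ _ (by simp)]
      simp
    rw [h1]
    have h2 : (order :: ((List.range k).map a ++ (a k :: List.replicate (2*m+1) 0) ++
          ((List.range k).map (fun i => order - a i)).reverse)).getD (k+1) 0 = a k := by
      simp [List.getD_eq_getElem?_getD]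
    rw [h2]
    have h3 : (order :: ((List.range k).map a ++ (a k :: List.replicate (2*m+1) 0) ++
          ((List.range k).map (fun i => order - a i)).reverse)).set (2*n - k) (order - a k)
        = order :: ((List.range (k+1)).map a ++ List.replicate (2*m) 0 ++
          ((List.range (k+1)).map (fun i => order - a i)).reverse) := by
      rw [show 2*n - k = (2*n - k - 1) + 1 by omega, List.set_cons_succ,
          List.set_append_left _ _ (by simp; omega),
          List.set_append_right _ _ (by simp; omega),
          show 2*n - k - 1 - ((List.range k).map a).length = 2*m+1 by simp; omega,
          show (2:Nat)*m+1 = (2*m)+1 by omega]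
      simp [List.replicate_succ', List.range_succ]
    rw [h3]
    exact ih (k+1) (by omega)

lemma foldlWrap (faces : Int) (seq : List Int) :
    ∀ (m k : Nat), m + k = seq.length →
      (List.range' k m).foldl
        (fun ns i => (ns.set i (ns.getD i 0 * 2)) ++
          [faces - ((ns.set i (ns.getD i 0 * 2)).getD i 0) + 1])
        ((seq.take k).map (fun x => x * 2) ++ seq.drop k ++
          (seq.take k).map (fun x => faces - x * 2 + 1))
      = seq.map (fun x => x * 2) ++ seq.map (fun x => faces - x * 2 + 1) := by
  intro m
  induction m with
  | zero =>
    intro k hk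
    have : k = seq.length := by omega
    subst this
    simp
  | succ m ih =>
    intro k hk
    have hklt : k < seq.length := by omega
    rw [List.range'_succ, List.foldl_cons]
    have hd : seq.drop k = seq[k] :: seq.drop (k+1) := List.drop_eq_getElem_cons hklt
    have g1 : ((seq.take k).map (fun x => x * 2) ++ seq.drop k ++
          (seq.take k).map (fun x => faces - x * 2 + 1)).getD k 0 = seq[k] := by
      simp only [List.getD_eq_getElem?_getD]
      rw [List.getElem?_append_left
            (by simp only [List.length_append, List.length_map, List.length_take, List.length_drop]; omega),
          List.getElem?_append_right
            (by simp only [List.length_map, List.length_take]; omega),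
          show k - ((seq.take k).map (fun x => x * 2)).length = 0 by
            simp only [List.length_map, List.length_take]; omega,
          hd]
      rfl
    simp only [g1]
    have h1 : ((seq.take k).map (fun x => x * 2) ++ seq.drop k ++
          (seq.take k).map (fun x => faces - x * 2 + 1)).set k (seq[k] * 2)
        = (seq.take k).map (fun x => x * 2) ++ (seq[k] * 2 :: seq.drop (k+1)) ++
          (seq.take k).map (fun x => faces - x * 2 + 1) := by
      rw [List.set_append_left _ _
            (by simp only [List.length_append, List.length_map, List.length_take, List.length_drop]; omega),
          List.set_append_right _ _
            (by simp only [List.length_map, List.length_take]; omega),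
          show k - ((seq.take k).map (fun x => x * 2)).length = 0 by
            simp only [List.length_map, List.length_take]; omega,
          hd]
      rfl
    rw [h1]
    have g2 : ((seq.take k).map (fun x => x * 2) ++ (seq[k] * 2 :: seq.drop (k+1)) ++
          (seq.take k).map (fun x => faces - x * 2 + 1)).getD k 0 = seq[k] * 2 := by
      simp only [List.getD_eq_getElem?_getD]
      rw [List.getElem?_append_left
            (by simp only [List.length_append, List.length_map, List.length_take, List.length_cons, List.length_drop]; omega),
          List.getElem?_append_right
            (by simp only [List.length_map, List.length_take]; omega),
          show k - ((seq.take k).map (fun x => x * 2)).length = 0 by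
            simp only [List.length_map, List.length_take]; omega]
      rfl
    rw [g2]
    have h3 : (seq.take k).map (fun x => x * 2) ++ (seq[k] * 2 :: seq.drop (k+1)) ++
          (seq.take k).map (fun x => faces - x * 2 + 1) ++ [faces - seq[k] * 2 + 1]
        = (seq.take (k+1)).map (fun x => x * 2) ++ seq.drop (k+1) ++
          (seq.take (k+1)).map (fun x => faces - x * 2 + 1) := by
      rw [List.take_succ_eq_append_getElem hklt]
      simp only [List.map_append, List.map_cons, List.map_nil, List.append_assoc,
        List.cons_append, List.nil_append]
    rw [h3]
    exact ih (k+1) (by omega)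

-- foldlWrap started at the beginning on the bare sequence
lemma foldlWrap0 (faces : Int) (seq : List Int) (n : Nat) (h : n = seq.length) :
    (List.range n).foldl
      (fun ns i => (ns.set i (ns.getD i 0 * 2)) ++
        [faces - ((ns.set i (ns.getD i 0 * 2)).getD i 0) + 1]) seq
    = seq.map (fun x => x * 2) ++ seq.map (fun x => faces - x * 2 + 1) := by
  subst h
  rw [List.range_eq_range']
  have h0 := foldlWrap faces seq seq.length 0 (by omega)
  simpa using h0

-- indexing a list over the range of its length is mapping over it
lemma mapGetDRange (xs : List Int) (f : Int → Int) (n : Nat) (h : n = xs.length) :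
    (List.range n).map (fun i => f (xs.getD i 0)) = xs.map f := by
  subst h
  apply List.ext_getElem <;> simp [List.getD_eq_getElem?_getD]
  intro i h1 h2
  simp [List.getElem?_eq_getElem h1]

-- length of one rebuild step
lemma stepB_length (order : Int) (seq : List Int) :
    (stepB order seq).length =
      if PySem.Int.mod order 2 == 0 then 2 * seq.length
      else 1 + 2 * (PySem.Int.floordiv order 2).toNat := by
  unfold stepB
  by_cases h : (PySem.Int.mod order 2 == 0) = true
  · rw [if_pos h, if_pos h]
    by_cases h2 : (PySem.Int.mod (PySem.Int.floordiv order 2) 2 == 0) = true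
    · rw [if_pos h2]; simp [List.length_append]; omega
    · rw [if_neg h2]; simp [List.length_append]; omega
  · rw [if_neg h, if_neg h]
    simp [List.length_append]
    omega

-- the central bridge: A's fueled recursion equals B's chain + bottom-up rebuild,
-- together with the length of the produced sequence
lemma key (fuel : Nat) : ∀ (order : Int), 3 ≤ order → order.toNat < 2 ^ fuel →
    (recSeqA fuel order).length = order.toNat ∧
    recSeqA fuel order = (chainB fuel order).1.foldr stepB (baseSeqB (chainB fuel order).2) := by
  induction fuel with
  | zero =>
    intro order h1 h2
    simp at h2
    omega
  | succ fuel ih =>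
    intro order h3 hlt
    by_cases e3 : order = 3
    · subst e3; exact ⟨by simp [recSeqA], by simp [recSeqA, chainB, baseSeqB]⟩
    by_cases e4 : order = 4
    · subst e4; exact ⟨by simp [recSeqA], by simp [recSeqA, chainB, baseSeqB]⟩
    by_cases e5 : order = 5
    · subst e5; exact ⟨by simp [recSeqA], by simp [recSeqA, chainB, baseSeqB]⟩
    have h6 : 6 ≤ order := by
      rcases lt_or_ge order 6 with h | h
      · interval_cases order <;> simp_all
      · exact h
    have hfd : PySem.Int.floordiv order 2 = order / 2 :=
      PySem.Int.floordiv_eq_ediv_of_pos (by norm_num)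
    have h3' : 3 ≤ PySem.Int.floordiv order 2 := by rw [hfd]; omega
    have hlt' : (PySem.Int.floordiv order 2).toNat < 2 ^ fuel := by
      rw [hfd]
      have : 2 ^ (fuel + 1) = 2 * 2 ^ fuel := by ring
      omega
    obtain ⟨ihlen, iheq⟩ := ih (PySem.Int.floordiv order 2) h3' hlt'
    have hchain : chainB (fuel + 1) order =
        (order :: (chainB fuel (PySem.Int.floordiv order 2)).1,
          (chainB fuel (PySem.Int.floordiv order 2)).2) := by
      simp [chainB, e3, e4, e5]
    by_cases he : pyIsEven order
    · -- even order
      have hmod : order % 2 = 0 := by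
        have hm := PySem.Int.mod_eq_emod_of_pos (a := order) (b := 2) (by norm_num)
        simpa [pyIsEven, hm] using he
      have hnn : order.toNat = (PySem.Int.floordiv order 2).toNat + (PySem.Int.floordiv order 2).toNat := by
        rw [hfd]; omega
      have he' : (PySem.Int.mod order 2 == 0) = true := he
      have heq : recSeqA (fuel + 1) order =
          stepB order (recSeqA fuel (PySem.Int.floordiv order 2)) := by
        by_cases hne : pyIsEven (PySem.Int.floordiv order 2)
        · -- even-even
          simp only [recSeqA, e3, e4, e5, if_false, he, if_true, hne]
          rw [hnn, List.replicate_add,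
            show (List.replicate (PySem.Int.floordiv order 2).toNat (0:Int) ++
                List.replicate (PySem.Int.floordiv order 2).toNat 0) =
              (List.range 0).map (fun i => (recSeqA fuel (PySem.Int.floordiv order 2)).getD i 0 * 2) ++
                List.replicate (PySem.Int.floordiv order 2).toNat 0 ++
              (List.range 0).map (fun i =>
                ((recSeqA fuel (PySem.Int.floordiv order 2)).getD i 0 * 2) - 1) ++
                List.replicate (PySem.Int.floordiv order 2).toNat 0 by simp,
            List.range_eq_range' (n := (PySem.Int.floordiv order 2).toNat),
            foldlEven ((PySem.Int.floordiv order 2).toNat)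
              (fun i => (recSeqA fuel (PySem.Int.floordiv order 2)).getD i 0 * 2)
              (fun _ v => v - 1) ((PySem.Int.floordiv order 2).toNat) 0 (by omega)]
          have hne' : (PySem.Int.mod (PySem.Int.floordiv order 2) 2 == 0) = true := hne
          simp only [stepB, he', hne', if_true]
          rw [mapGetDRange _ (fun x => x * 2) _ ihlen.symm,
              mapGetDRange _ (fun x => x * 2 - 1) _ ihlen.symm]
        · -- even-odd
          have hne' : (PySem.Int.mod (PySem.Int.floordiv order 2) 2 == 0) = false :=
            Bool.eq_false_iff.mpr hne
          simp only [recSeqA, e3, e4, e5, if_false, he, if_true, hne, Bool.false_eq_true]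
          rw [hnn, List.replicate_add,
            show (List.replicate (PySem.Int.floordiv order 2).toNat (0:Int) ++
                List.replicate (PySem.Int.floordiv order 2).toNat 0) =
              (List.range 0).map (fun i => (recSeqA fuel (PySem.Int.floordiv order 2)).getD i 0 * 2) ++
                List.replicate (PySem.Int.floordiv order 2).toNat 0 ++
              (List.range 0).map (fun i =>
                (PySem.Int.floordiv order 2 - (recSeqA fuel (PySem.Int.floordiv order 2)).getD i 0 + 1) * 2 - 1) ++
                List.replicate (PySem.Int.floordiv order 2).toNat 0 by simp,
            List.range_eq_range' (n := (PySem.Int.floordiv order 2).toNat),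
            foldlEven ((PySem.Int.floordiv order 2).toNat)
              (fun i => (recSeqA fuel (PySem.Int.floordiv order 2)).getD i 0 * 2)
              (fun i _ => (PySem.Int.floordiv order 2 -
                (recSeqA fuel (PySem.Int.floordiv order 2)).getD i 0 + 1) * 2 - 1)
              ((PySem.Int.floordiv order 2).toNat) 0 (by omega)]
          simp only [stepB, he', hne', Bool.false_eq_true, if_true, if_false]
          rw [mapGetDRange _ (fun x => x * 2) _ ihlen.symm,
              mapGetDRange _ (fun x => (PySem.Int.floordiv order 2 - x + 1) * 2 - 1) _ ihlen.symm]
      refine ⟨?_, ?_⟩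
      · have he' : (PySem.Int.mod order 2 == 0) = true := he
        rw [heq, stepB_length, if_pos he', ihlen]
        omega
      · rw [heq, hchain, List.foldr_cons, iheq]
    · -- odd order
      have hmod : order % 2 = 1 := by
        have hm := PySem.Int.mod_eq_emod_of_pos (a := order) (b := 2) (by norm_num)
        simp [pyIsEven] at he
        omega
      have hnn : order.toNat = 2 * (PySem.Int.floordiv order 2).toNat + 1 := by
        rw [hfd]; omega
      have he' : (PySem.Int.mod order 2 == 0) = false := Bool.eq_false_iff.mpr he
      have heq : recSeqA (fuel + 1) order =
          stepB order (recSeqA fuel (PySem.Int.floordiv order 2)) := by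
        simp only [recSeqA, e3, e4, e5, if_false, he, Bool.false_eq_true]
        rw [hnn]
        simp only [Nat.succ_sub_succ]
        rw [show (List.replicate (2 * (PySem.Int.floordiv order 2).toNat + 1) (0:Int)).set 0 order =
              order :: ((List.range 0).map (fun i =>
                  (recSeqA fuel (PySem.Int.floordiv order 2)).getD
                    ((PySem.Int.floordiv order 2).toNat - i - 1) 0 * 2) ++
                List.replicate (2 * (PySem.Int.floordiv order 2).toNat) 0 ++
                ((List.range 0).map (fun i => order -
                  ((recSeqA fuel (PySem.Int.floordiv order 2)).getD
                    ((PySem.Int.floordiv order 2).toNat - i - 1) 0 * 2))).reverse) by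
            simp [List.replicate_succ],
          List.range_eq_range' (n := (PySem.Int.floordiv order 2).toNat),
          foldlOdd ((PySem.Int.floordiv order 2).toNat) order
            (fun i => (recSeqA fuel (PySem.Int.floordiv order 2)).getD
              ((PySem.Int.floordiv order 2).toNat - i - 1) 0 * 2)
            ((PySem.Int.floordiv order 2).toNat) 0 (by omega)]
        simp only [stepB, he', Bool.false_eq_true, if_false]
        congr 1
        rw [List.map_reverse, List.map_map]
        congr 1
        · apply List.map_congr_left
          intro i _
          have h : (PySem.Int.floordiv order 2).toNat - i - 1 =
              (PySem.Int.floordiv order 2).toNat - 1 - i := by omega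
          rw [h]
        · congr 1
          apply List.map_congr_left
          intro i _
          simp only [Function.comp_apply]
          have h : (PySem.Int.floordiv order 2).toNat - i - 1 =
              (PySem.Int.floordiv order 2).toNat - 1 - i := by omega
          rw [h]
      refine ⟨?_, ?_⟩
      · rw [heq, stepB_length, if_neg (by rw [he']; simp)]
        omega
      · rw [heq, hchain, List.foldr_cons, iheq]

-- ===== VERDICT (by name: the statement is the Claim_ definition above) =====
theorem diceNumberAlgorithmSequence_spec : Claim_equal_diceNumberAlgorithmSequence := by
  intro faces _
  unfold Spec_diceNumberAlgorithmSequence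
  unfold diceNumberAlgorithmSequence diceNumberAlgorithmSequence_alt
  by_cases hlt : faces < 3
  · simp only [hlt, if_true]
    rw [PySem.List.pyRange_one, PySem.List.pyRange_one, List.map_map]
    simp only [Int.sub_zero, Int.add_sub_cancel]
    apply List.map_congr_left
    intro k _
    simp [Int.add_comm]
  · simp only [hlt, if_false]
    by_cases h4 : faces = 4
    · simp [h4]
    · simp only [h4, if_false]
      have h3 : 3 ≤ faces := by omega
      by_cases he : pyIsEven faces
      · -- even faces, faces ≥ 6
        have hmod : faces % 2 = 0 := by
          have hm := PySem.Int.mod_eq_emod_of_pos (a := faces) (b := 2) (by norm_num)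
          simpa [pyIsEven, hm] using he
        have h6 : 6 ≤ faces := by omega
        have hfd : PySem.Int.floordiv faces 2 = faces / 2 :=
          PySem.Int.floordiv_eq_ediv_of_pos (by norm_num)
        have h3' : 3 ≤ PySem.Int.floordiv faces 2 := by rw [hfd]; omega
        have hpow : (PySem.Int.floordiv faces 2).toNat < 2 ^ faces.toNat := by
          have h1 : (PySem.Int.floordiv faces 2).toNat ≤ faces.toNat := by rw [hfd]; omega
          have h2 : faces.toNat < 2 ^ faces.toNat := Nat.lt_two_pow_self
          omega
        obtain ⟨klen, keq⟩ := key faces.toNat (PySem.Int.floordiv faces 2) h3' hpow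
        have hB : pyIsEven faces = (PySem.Int.mod faces 2 == 0) := rfl
        simp only [he, if_true, hB.symm]
        rw [foldlWrap0 faces (recSeqA faces.toNat (PySem.Int.floordiv faces 2))
              ((PySem.Int.floordiv faces 2).toNat) klen.symm]
        rw [keq, List.map_map]
        rfl
      · -- odd faces
        have hB : pyIsEven faces = (PySem.Int.mod faces 2 == 0) := rfl
        simp only [he, if_false, hB.symm, Bool.false_eq_true]
        have hpow : faces.toNat < 2 ^ faces.toNat := Nat.lt_two_pow_self
        exact (key faces.toNat faces h3 hpow).2
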